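-- pv_equiv track=rewrite | github.com/qiyunzhu/woltka | woltka/tree.py | fill_root
-- ===== SOURCE A (Python) =====
-- def fill_root(tree):
--     """Add a root node to a tree if absent.
--
--     Parameters
--     ----------
--     tree : dict
--         Taxonomy tree.
--
--     Returns
--     -------
--     str
--         Root node identifier
--
--     Notes
--     -----
--     A root is defined as having parent as itself, a behavior derived from the
--     NCBI convention. Only root must be present in a tree, so that all taxa can
--     be traced back to the same root.
--
--     In custom trees, there may or may not be a clearly defined root. This
--     function aims as defining a root for any given tree. Specifically, if
--     there is one root node (highest hierarchy), this node will be "sealed"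
--     (making parent as itself). If there are multiple crown nodes ("crown"
--     describes the root of a clade instead of the entire tree), a new root
--     node will be generated and serve as the parent of all crown nodes.
--     """
--     crown, toadd, tested = [], set(), set()
--     for taxon in tree:
--         this = taxon
--         while True:
--             if this in tested:
--                 break
--             tested.add(this)
--
--             # parent is missing
--             try:
--                 parent = tree[this]
--             except KeyError:
--                 crown.append(this)
--                 toadd.add(this)
--                 break
--
--             # parent is None
--             if parent is None:
--                 crown.append(this)
--                 break
--
--             # parent is itself
--             if parent == this:
--                 crown.append(this)
--                 break
--             this = parent
--
--     # fill non-existent root or crown nodes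
--     for node in toadd:
--         tree[node] = None
--
--     # this happens only when tree is empty
--     if len(crown) == 0:
--         return None
--
--     # there is only one crown node
--     elif len(crown) == 1:
--
--         # make the parent of root iself
--         root = crown[0]
--         tree[root] = root
--         return root
--
--     # there are more than one crown node
--     else:
--
--         # in NCBI convention, root should have identifier "1"
--         i = 1
--
--         # in case "1" is already in tree, find an unused integer
--         while True:
--             if str(i) not in tree:
--                 break
--             i += 1
--         root = str(i)
--         tree[root] = root
--
--         # coalesce all crown nodes to root
--         for x in crown:
--             tree[x] = root
--         return root
-- ===== SOURCE B (Python) =====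
-- def fill_root(tree):
--     """Add a root node to a tree if absent (single-pass set formulation).
--
--     Return value matches the original; also performs the same tree mutations.
--     """
--     # crown nodes read off in one pass: terminal keys, plus missing parents
--     crown = {t for t, p in tree.items() if p is None or p == t}
--     toadd = {p for t, p in tree.items()
--              if p is not None and p != t and p not in tree}
--     crown |= toadd
--
--     for node in toadd:
--         tree[node] = None
--
--     if not crown:
--         return None
--
--     if len(crown) == 1:
--         (root,) = crown
--         tree[root] = root
--         return root
--
--     i = 1
--     while str(i) in tree:
--         i += 1
--     root = str(i)
--     tree[root] = root
--     for x in crown: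
--         tree[x] = root
--     return root
-- ===== Notes on version B (the rewrite author's own statement) =====
-- stated objective: simpler
-- what changed: The parent-climbing while-loop with its tested memoization is replaced by one pass over tree.items() that reads the crown off directly as set comprehensions (terminal keys plus missing parent values); the fill/seal logic is kept.
import Mathlib
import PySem

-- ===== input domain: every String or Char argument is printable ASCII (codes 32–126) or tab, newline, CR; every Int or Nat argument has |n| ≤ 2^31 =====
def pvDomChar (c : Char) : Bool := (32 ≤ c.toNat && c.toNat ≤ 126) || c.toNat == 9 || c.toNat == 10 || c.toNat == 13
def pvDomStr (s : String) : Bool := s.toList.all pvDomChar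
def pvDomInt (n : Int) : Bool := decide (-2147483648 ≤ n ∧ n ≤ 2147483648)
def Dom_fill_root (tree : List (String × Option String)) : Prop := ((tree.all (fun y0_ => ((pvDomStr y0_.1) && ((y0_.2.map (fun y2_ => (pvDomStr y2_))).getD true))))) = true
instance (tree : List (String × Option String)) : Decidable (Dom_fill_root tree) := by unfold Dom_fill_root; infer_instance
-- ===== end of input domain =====

-- B replaces A's parent-climbing while-loop (with its `tested` memoization) by one pass over
-- tree.items() that reads the crown off directly as two set comprehensions; objective: simpler.
-- Both versions also mutate the input dict; the equivalence proved here is about the RETURN value.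

-- ===== PORT A =====
-- shared helper, the loop `i = 1; while str(i) in tree: i += 1` (textually identical in A and B);
-- the fuel argument only makes the loop total: size+1 probes always find a free integer (pigeonhole)
def findFree (keys : List String) (i : Int) : Nat → Int
  | 0 => i
  | fuel+1 => if keys.contains (PySem.Int.toStr i) then findFree keys (i+1) fuel else i

-- the inner `while True:` climb of A; state = (crown, toadd, tested); fuel only for totality
-- (each non-breaking step tests a previously untested key, so d.size+1 steps always suffice)
def climbA (d : PySem.Dict String (Option String)) :
    Nat → String → List String × PySem.Set String × PySem.Set String →
    List String × PySem.Set String × PySem.Set String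
  | 0, _, st => st
  | fuel+1, this, (crown, toadd, tested) =>
    if PySem.Set.contains tested this then (crown, toadd, tested)
    else
      let tested := PySem.Set.add tested this
      match d.get? this with
      | none => (crown ++ [this], PySem.Set.add toadd this, tested)      -- KeyError branch
      | some none => (crown ++ [this], toadd, tested)                    -- parent is None
      | some (some p) =>
        if p == this then (crown ++ [this], toadd, tested)               -- parent is itself
        else climbA d fuel p (crown, toadd, tested)

def fill_root (tree : List (String × Option String)) : Option String :=
  let d := PySem.Dict.ofList tree
  let st := d.keys.foldl (fun st taxon => climbA d (d.size + 1) taxon st)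
      ([], PySem.Set.empty, PySem.Set.empty)
  let crown := st.1
  let toadd := st.2.1
  let d := toadd.foldl (fun d node => d.insert node none) d    -- for node in toadd: tree[node] = None
  if crown.length = 0 then none
  else if crown.length = 1 then some crown.headI               -- root = crown[0]
  else some (PySem.Int.toStr (findFree d.keys 1 (d.size + 1)))

-- ===== PORT B =====
def fill_root_alt (tree : List (String × Option String)) : Option String :=
  let d := PySem.Dict.ofList tree
  -- crown = {t for t, p in tree.items() if p is None or p == t}
  let crown0 : PySem.Set String := PySem.Set.ofList
      ((d.items.filter (fun kv => match kv.2 with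
          | none => true
          | some p => p == kv.1)).map (·.1))
  -- toadd = {p for t, p in tree.items() if p is not None and p != t and p not in tree}
  let toadd : PySem.Set String := PySem.Set.ofList
      (d.items.filterMap (fun kv => match kv.2 with
          | none => none
          | some p => if p == kv.1 || d.contains p then none else some p))
  let crown := PySem.Set.union crown0 toadd                    -- crown |= toadd
  let d := toadd.foldl (fun d node => d.insert node none) d    -- for node in toadd: tree[node] = None
  if PySem.Set.len crown = 0 then none
  else if PySem.Set.len crown = 1 then some crown.headI        -- (root,) = crown
  else some (PySem.Int.toStr (findFree d.keys 1 (d.size + 1)))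

-- ===== PRECONDITION & SPEC =====
def Spec_fill_root (tree : List (String × Option String)) (out : Option String) : Prop := out = fill_root_alt tree
instance (tree : List (String × Option String)) (out : Option String) : Decidable (Spec_fill_root tree out) := by unfold Spec_fill_root; infer_instance

-- ===== CLAIM (what is proved, stated in full; the proofs are below) =====
def Claim_equal_fill_root : Prop := ∀ (tree : List (String × Option String)), Dom_fill_root tree → Spec_fill_root tree (fill_root tree)


-- ===== LEMMAS AND PROOFS =====

-- x is a terminal ("crown-shaped") node of d: missing, parentless, or its own parent
def isTerm (d : PySem.Dict String (Option String)) (x : String) : Bool :=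
  match d.get? x with
  | none => true
  | some none => true
  | some (some p) => p == x

-- all parent values occurring in d
def parentVals (d : PySem.Dict String (Option String)) : List String :=
  d.items.filterMap (fun kv => kv.2)

def toaddPred (d : PySem.Dict String (Option String)) (x : String) : Prop :=
  d.contains x = false ∧ x ∈ parentVals d

def crownPred (d : PySem.Dict String (Option String)) (x : String) : Prop :=
  (d.contains x = true ∧ isTerm d x = true) ∨ toaddPred d x

-- invariant of A's loop state (crown, toadd, tested)
def InvA (d : PySem.Dict String (Option String))
    (st : List String × PySem.Set String × PySem.Set String) : Prop :=
  st.2.2.Nodup ∧ st.1.Nodup ∧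
  (∀ x, x ∈ st.1 ↔ (x ∈ st.2.2 ∧ isTerm d x = true)) ∧
  (∀ x, x ∈ st.2.1 ↔ (x ∈ st.2.2 ∧ d.contains x = false)) ∧
  (∀ x ∈ st.2.2, d.contains x = true ∨ x ∈ parentVals d)

-- tested is closed under the climb edge, except possibly for edges into f
def ClosedExc (d : PySem.Dict String (Option String))
    (tested : PySem.Set String) (f : Option String) : Prop :=
  ∀ x ∈ tested, ∀ p, d.get? x = some (some p) → (p == x) = false → p ∈ tested ∨ some p = f

theorem length_filter_lt_of_witness {α : Type} (l : List α) (p q : α → Bool)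
    (h : ∀ a ∈ l, q a = true → p a = true) (a : α) (ha : a ∈ l)
    (hp : p a = true) (hq : q a = false) :
    (l.filter q).length < (l.filter p).length := by
  induction l with
  | nil => cases ha
  | cons b t ih =>
    have hmono : (t.filter q).length ≤ (t.filter p).length := by
      rw [← List.countP_eq_length_filter, ← List.countP_eq_length_filter]
      exact List.countP_mono_left (fun x hx hqx => h x (List.mem_cons_of_mem _ hx) hqx)
    rcases List.mem_cons.mp ha with rfl | hat
    · rw [List.filter_cons_of_pos hp, List.filter_cons_of_neg (by simp [hq])]
      simpa using Nat.lt_succ_of_le hmono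
    · have h' : ∀ x ∈ t, q x = true → p x = true :=
        fun x hx => h x (List.mem_cons_of_mem _ hx)
      have hlt := ih h' hat
      cases hqb : q b with
      | false =>
        rw [List.filter_cons_of_neg (by simp [hqb])]
        cases hpb : p b with
        | false => rw [List.filter_cons_of_neg (by simp [hpb])]; exact hlt
        | true => rw [List.filter_cons_of_pos hpb]; simp; omega
      | true =>
        have hpb := h b List.mem_cons_self hqb
        rw [List.filter_cons_of_pos hpb, List.filter_cons_of_pos hqb]
        simpa using hlt

theorem findFree_congr (s t : List String) (h : ∀ x, x ∈ s ↔ x ∈ t) :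
    ∀ (i : Int) (fuel : Nat), findFree s i fuel = findFree t i fuel := by
  intro i fuel
  induction fuel generalizing i with
  | zero => rfl
  | succ fuel ih =>
    have hc : s.contains (PySem.Int.toStr i) = t.contains (PySem.Int.toStr i) := by
      rw [Bool.eq_iff_iff, List.contains_iff_mem, List.contains_iff_mem]
      exact h _
    simp only [findFree, hc]
    cases t.contains (PySem.Int.toStr i) <;> simp [ih]

theorem climbA_spec (d : PySem.Dict String (Option String))
    (fuel : Nat) (this : String) (st : List String × PySem.Set String × PySem.Set String)
    (hInv : InvA d st) (hCl : ClosedExc d st.2.2 (some this))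
    (hthis : d.contains this = true ∨ this ∈ parentVals d)
    (hfuel : (d.keys.filter (fun k => !(st.2.2.contains k))).length + 1 ≤ fuel) :
    InvA d (climbA d fuel this st) ∧ ClosedExc d (climbA d fuel this st).2.2 none ∧
    this ∈ (climbA d fuel this st).2.2 ∧ (∀ x ∈ st.2.2, x ∈ (climbA d fuel this st).2.2) := by
  induction fuel generalizing this st with
  | zero => exact absurd hfuel (by omega)
  | succ fuel ih =>
    obtain ⟨crown, toadd, tested⟩ := st
    obtain ⟨hTn, hCn, hC, hT, hU⟩ := hInv
    simp only at hC hT hU hCl hfuel ⊢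
    cases hmem : PySem.Set.contains tested this with
    | true =>
      have hmem' : this ∈ tested := (PySem.Set.contains_iff _ _).mp hmem
      simp only [climbA, hmem, if_true]
      refine ⟨⟨hTn, hCn, hC, hT, hU⟩, ?_, hmem', fun x hx => hx⟩
      intro x hx p hp hne
      rcases hCl x hx p hp hne with hin | heq
      · exact Or.inl hin
      · obtain rfl : p = this := by injection heq
        exact Or.inl hmem'
    | false =>
      have hnm : this ∉ tested := fun hmm => by
        rw [(PySem.Set.contains_iff tested this).mpr hmm] at hmem; cases hmem
      have hmemT : ∀ y, y ∈ PySem.Set.add tested this ↔ y ∈ tested ∨ y = this :=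
        fun y => PySem.Set.mem_add tested this y
      have hTn' : (PySem.Set.add tested this).Nodup := PySem.Set.nodup_add _ _ hTn
      have hnc : this ∉ crown := fun hc => hnm ((hC this).mp hc).1
      have hCn' : (crown ++ [this]).Nodup :=
        List.Nodup.append hCn (List.nodup_singleton this)
          (by intro a ha hb; rw [List.mem_singleton] at hb; subst hb; exact hnc ha)
      -- closure of the enlarged tested against old edges
      have hClOld : ∀ x ∈ tested, ∀ p, d.get? x = some (some p) → (p == x) = false →
          p ∈ PySem.Set.add tested this := by
        intro x hx p hp hne
        rcases hCl x hx p hp hne with hin | heq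
        · exact (hmemT p).mpr (Or.inl hin)
        · obtain rfl : p = this := by injection heq
          exact (hmemT p).mpr (Or.inr rfl)
      cases hg : d.get? this with
      | none =>
        have hterm : isTerm d this = true := by simp [isTerm, hg]
        have hcf : d.contains this = false := by
          rw [PySem.Dict.contains_eq_isSome_get?, hg]; rfl
        simp only [climbA, hmem, Bool.false_eq_true, if_false, hg]
        refine ⟨⟨hTn', hCn', ?_, ?_, ?_⟩, ?_, (hmemT this).mpr (Or.inr rfl),
          fun x hx => (hmemT x).mpr (Or.inl hx)⟩
        · intro x
          simp only [List.mem_append, List.mem_singleton, hmemT x]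
          constructor
          · rintro (hx | rfl)
            · exact ⟨Or.inl ((hC x).mp hx).1, ((hC x).mp hx).2⟩
            · exact ⟨Or.inr rfl, hterm⟩
          · rintro ⟨hx | rfl, ht⟩
            · exact Or.inl ((hC x).mpr ⟨hx, ht⟩)
            · exact Or.inr rfl
        · intro x
          rw [PySem.Set.mem_add, hmemT x]
          constructor
          · rintro (hx | rfl)
            · exact ⟨Or.inl ((hT x).mp hx).1, ((hT x).mp hx).2⟩
            · exact ⟨Or.inr rfl, hcf⟩
          · rintro ⟨hx | rfl, hcx⟩
            · exact Or.inl ((hT x).mpr ⟨hx, hcx⟩)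
            · exact Or.inr rfl
        · intro x hx
          rcases (hmemT x).mp hx with hx' | rfl
          · exact hU x hx'
          · exact hthis
        · intro x hx p hp hne
          rcases (hmemT x).mp hx with hx' | rfl
          · exact Or.inl (hClOld x hx' p hp hne)
          · rw [hg] at hp; cases hp
      | some v =>
        have hct : d.contains this = true := by
          rw [PySem.Dict.contains_eq_isSome_get?, hg]; rfl
        cases v with
        | none =>
          have hterm : isTerm d this = true := by simp [isTerm, hg]
          simp only [climbA, hmem, Bool.false_eq_true, if_false, hg]
          refine ⟨⟨hTn', hCn', ?_, ?_, ?_⟩, ?_, (hmemT this).mpr (Or.inr rfl),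
            fun x hx => (hmemT x).mpr (Or.inl hx)⟩
          · intro x
            simp only [List.mem_append, List.mem_singleton, hmemT x]
            constructor
            · rintro (hx | rfl)
              · exact ⟨Or.inl ((hC x).mp hx).1, ((hC x).mp hx).2⟩
              · exact ⟨Or.inr rfl, hterm⟩
            · rintro ⟨hx | rfl, ht⟩
              · exact Or.inl ((hC x).mpr ⟨hx, ht⟩)
              · exact Or.inr rfl
          · intro x
            rw [hmemT x]
            constructor
            · intro hx
              exact ⟨Or.inl ((hT x).mp hx).1, ((hT x).mp hx).2⟩
            · rintro ⟨hx | rfl, hcx⟩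
              · exact (hT x).mpr ⟨hx, hcx⟩
              · rw [hct] at hcx; cases hcx
          · intro x hx
            rcases (hmemT x).mp hx with hx' | rfl
            · exact hU x hx'
            · exact Or.inl hct
          · intro x hx p hp hne
            rcases (hmemT x).mp hx with hx' | rfl
            · exact Or.inl (hClOld x hx' p hp hne)
            · rw [hg] at hp; simp at hp
        | some p =>
          cases hpe : p == this with
          | true =>
            have hpt : p = this := by simpa using hpe
            have hterm : isTerm d this = true := by simp [isTerm, hg, hpe]
            simp only [climbA, hmem, Bool.false_eq_true, if_false, hg, hpe, if_true]
            refine ⟨⟨hTn', hCn', ?_, ?_, ?_⟩, ?_, (hmemT this).mpr (Or.inr rfl),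
              fun x hx => (hmemT x).mpr (Or.inl hx)⟩
            · intro x
              simp only [List.mem_append, List.mem_singleton, hmemT x]
              constructor
              · rintro (hx | rfl)
                · exact ⟨Or.inl ((hC x).mp hx).1, ((hC x).mp hx).2⟩
                · exact ⟨Or.inr rfl, hterm⟩
              · rintro ⟨hx | rfl, ht⟩
                · exact Or.inl ((hC x).mpr ⟨hx, ht⟩)
                · exact Or.inr rfl
            · intro x
              rw [hmemT x]
              constructor
              · intro hx
                exact ⟨Or.inl ((hT x).mp hx).1, ((hT x).mp hx).2⟩
              · rintro ⟨hx | rfl, hcx⟩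
                · exact (hT x).mpr ⟨hx, hcx⟩
                · rw [hct] at hcx; cases hcx
            · intro x hx
              rcases (hmemT x).mp hx with hx' | rfl
              · exact hU x hx'
              · exact Or.inl hct
            · intro x hx q hq hne
              rcases (hmemT x).mp hx with hx' | rfl
              · exact Or.inl (hClOld x hx' q hq hne)
              · have hqp : p = q := by
                  rw [hg] at hq
                  exact Option.some.inj (Option.some.inj hq)
                subst hqp
                rw [hpe] at hne; cases hne
          | false =>
            have hterm : isTerm d this = false := by simp [isTerm, hg, hpe]
            simp only [climbA, hmem, Bool.false_eq_true, if_false, hg, hpe]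
            have hkeys : this ∈ d.keys := (PySem.Dict.contains_iff_mem_keys d this).mp hct
            have hpv : p ∈ parentVals d := by
              have hmi := PySem.Dict.mem_items_of_get?_eq_some d hg
              exact List.mem_filterMap.mpr ⟨(this, some p), hmi, rfl⟩
            have hfuel' :
                ((d.keys.filter (fun k => !((PySem.Set.add tested this).contains k))).length + 1 ≤ fuel) := by
              have hlt := length_filter_lt_of_witness d.keys
                (fun k => !(tested.contains k))
                (fun k => !((PySem.Set.add tested this).contains k))
                (by
                  intro a _ hqa
                  show (!tested.contains a) = true
                  cases hca : tested.contains a with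
                  | false => rfl
                  | true =>
                    have hmm : a ∈ PySem.Set.add tested this :=
                      (hmemT a).mpr (Or.inl ((PySem.Set.contains_iff _ _).mp hca))
                    have hqa' : (!((PySem.Set.add tested this).contains a)) = true := hqa
                    rw [(PySem.Set.contains_iff _ _).mpr hmm] at hqa'
                    cases hqa')
                this hkeys (by show (!tested.contains this) = true; rw [hmem]; rfl)
                (by
                  show (!((PySem.Set.add tested this).contains this)) = false
                  have hmm : this ∈ PySem.Set.add tested this := (hmemT this).mpr (Or.inr rfl)
                  rw [(PySem.Set.contains_iff _ _).mpr hmm]; rfl)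
              omega
            have hInv' : InvA d (crown, toadd, PySem.Set.add tested this) := by
              refine ⟨hTn', hCn, ?_, ?_, ?_⟩
              · intro x
                simp only
                rw [hmemT x]
                constructor
                · intro hx
                  exact ⟨Or.inl ((hC x).mp hx).1, ((hC x).mp hx).2⟩
                · rintro ⟨hx | rfl, ht⟩
                  · exact (hC x).mpr ⟨hx, ht⟩
                  · rw [hterm] at ht; cases ht
              · intro x
                simp only
                rw [hmemT x]
                constructor
                · intro hx
                  exact ⟨Or.inl ((hT x).mp hx).1, ((hT x).mp hx).2⟩
                · rintro ⟨hx | rfl, hcx⟩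
                  · exact (hT x).mpr ⟨hx, hcx⟩
                  · rw [hct] at hcx; cases hcx
              · intro x hx
                rcases (hmemT x).mp hx with hx' | rfl
                · exact hU x hx'
                · exact Or.inl hct
            have hCl' : ClosedExc d (PySem.Set.add tested this) (some p) := by
              intro x hx q hq hne
              rcases (hmemT x).mp hx with hx' | rfl
              · exact Or.inl (hClOld x hx' q hq hne)
              · have hqp : p = q := by
                  rw [hg] at hq
                  exact Option.some.inj (Option.some.inj hq)
                subst hqp
                exact Or.inr rfl
            obtain ⟨h1, h2, h3, h4⟩ := ih p (crown, toadd, PySem.Set.add tested this)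
              hInv' hCl' (Or.inr hpv) hfuel'
            exact ⟨h1, h2, h4 this ((hmemT this).mpr (Or.inr rfl)), fun x hx =>
              h4 x ((hmemT x).mpr (Or.inl hx))⟩

theorem foldA_spec (d : PySem.Dict String (Option String)) (ks : List String)
    (hks : ∀ k ∈ ks, d.contains k = true)
    (st : List (String) × PySem.Set String × PySem.Set String)
    (hInv : InvA d st) (hCl : ClosedExc d st.2.2 none) :
    InvA d (ks.foldl (fun st taxon => climbA d (d.size + 1) taxon st) st) ∧
    ClosedExc d (ks.foldl (fun st taxon => climbA d (d.size + 1) taxon st) st).2.2 none ∧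
    (∀ k ∈ ks, k ∈ (ks.foldl (fun st taxon => climbA d (d.size + 1) taxon st) st).2.2) ∧
    (∀ x ∈ st.2.2, x ∈ (ks.foldl (fun st taxon => climbA d (d.size + 1) taxon st) st).2.2) := by
  induction ks generalizing st with
  | nil => exact ⟨hInv, hCl, by simp, fun x hx => hx⟩
  | cons k t ih =>
    have hCl' : ClosedExc d st.2.2 (some k) := by
      intro x hx p hp hne
      rcases hCl x hx p hp hne with hin | heq
      · exact Or.inl hin
      · cases heq
    have hfuel : (d.keys.filter (fun x => !(st.2.2.contains x))).length + 1 ≤ d.size + 1 := by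
      have h1 : (d.keys.filter (fun x => !(st.2.2.contains x))).length ≤ d.keys.length :=
        List.length_filter_le _ _
      have h2 : d.keys.length = d.size := by simp [PySem.Dict.keys, PySem.Dict.size]
      omega
    obtain ⟨h1, h2, h3, h4⟩ := climbA_spec d (d.size + 1) k st hInv hCl'
      (Or.inl (hks k List.mem_cons_self)) hfuel
    obtain ⟨g1, g2, g3, g4⟩ := ih (fun x hx => hks x (List.mem_cons_of_mem _ hx))
      (climbA d (d.size + 1) k st) h1 h2
    refine ⟨g1, g2, ?_, fun x hx => g4 x (h4 x hx)⟩
    intro x hx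
    rcases List.mem_cons.mp hx with rfl | hxt
    · exact g4 x h3
    · exact g3 x hxt

-- A's final state characterised: crown and toadd read off by crownPred/toaddPred
theorem core_eq (d : PySem.Dict String (Option String)) (hk : d.keys.Nodup) :
    (let st := d.keys.foldl (fun st taxon => climbA d (d.size + 1) taxon st)
        ([], PySem.Set.empty, PySem.Set.empty)
     let crown := st.1
     let toadd := st.2.1
     let d2 := toadd.foldl (fun d node => d.insert node none) d
     if crown.length = 0 then none
     else if crown.length = 1 then some crown.headI
     else some (PySem.Int.toStr (findFree d2.keys 1 (d2.size + 1)))) =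
    (let crown0 : PySem.Set String := PySem.Set.ofList
        ((d.items.filter (fun kv => match kv.2 with
            | none => true
            | some p => p == kv.1)).map (·.1))
     let toadd : PySem.Set String := PySem.Set.ofList
        (d.items.filterMap (fun kv => match kv.2 with
            | none => none
            | some p => if p == kv.1 || d.contains p then none else some p))
     let crown := PySem.Set.union crown0 toadd
     let d2 := toadd.foldl (fun d node => d.insert node none) d
     if PySem.Set.len crown = 0 then none
     else if PySem.Set.len crown = 1 then some crown.headI
     else some (PySem.Int.toStr (findFree d2.keys 1 (d2.size + 1)))) := by
  have hInv0 : InvA d ([], PySem.Set.empty, PySem.Set.empty) := by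
    refine ⟨?_, ?_, ?_, ?_, ?_⟩ <;> simp [PySem.Set.empty]
  have hCl0 : ClosedExc d (PySem.Set.empty) none := by
    intro x hx; simp [PySem.Set.empty] at hx
  obtain ⟨hInvA, hClA, hkt, -⟩ := foldA_spec d d.keys
    (fun k hk' => (PySem.Dict.contains_iff_mem_keys d k).mpr hk')
    ([], PySem.Set.empty, PySem.Set.empty) hInv0 hCl0
  set stA := d.keys.foldl (fun st taxon => climbA d (d.size + 1) taxon st)
      ([], PySem.Set.empty, PySem.Set.empty) with hstA
  obtain ⟨hTn, hCn, hC, hT, hU⟩ := hInvA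
  -- a node absent from the dict is terminal
  have hget_none : ∀ x, d.contains x = false → d.get? x = none := by
    intro x hcf
    have hiso := PySem.Dict.contains_eq_isSome_get? d x
    rw [hcf] at hiso
    cases hg : d.get? x with
    | none => rfl
    | some v => rw [hg] at hiso; cases hiso
  have hterm_nonkey : ∀ x, d.contains x = false → isTerm d x = true := by
    intro x hcf; simp [isTerm, hget_none x hcf]
  -- every missing parent ends up tested (via the closure of tested)
  have hPV_tested : ∀ x, d.contains x = false → x ∈ parentVals d → x ∈ stA.2.2 := by
    intro x hcf hpv
    obtain ⟨⟨c, v⟩, hmi, hv⟩ := List.mem_filterMap.mp hpv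
    simp only at hv; subst hv
    have hcK : c ∈ d.keys := PySem.Dict.mem_keys_of_mem_items d hmi
    have hgc : d.get? c = some (some x) := PySem.Dict.get?_of_mem_items d hmi hk
    have hne : (x == c) = false := by
      cases hbe : x == c with
      | false => rfl
      | true =>
        obtain rfl : x = c := by simpa using hbe
        rw [(PySem.Dict.contains_iff_mem_keys d x).mpr hcK] at hcf; cases hcf
    rcases hClA c (hkt c hcK) x hgc hne with hin | heq
    · exact hin
    · cases heq
  have hcrownA : ∀ x, x ∈ stA.1 ↔ crownPred d x := by
    intro x
    constructor
    · intro hx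
      obtain ⟨ht, hterm⟩ := (hC x).mp hx
      cases hcx : d.contains x with
      | true => exact Or.inl ⟨hcx, hterm⟩
      | false =>
        rcases hU x ht with hc | hpv
        · rw [hcx] at hc; cases hc
        · exact Or.inr ⟨hcx, hpv⟩
    · rintro (⟨hc, hterm⟩ | ⟨hcf, hpv⟩)
      · exact (hC x).mpr ⟨hkt x ((PySem.Dict.contains_iff_mem_keys d x).mp hc), hterm⟩
      · exact (hC x).mpr ⟨hPV_tested x hcf hpv, hterm_nonkey x hcf⟩
  have htoaddA : ∀ x, x ∈ stA.2.1 ↔ toaddPred d x := by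
    intro x
    constructor
    · intro hx
      obtain ⟨ht, hcf⟩ := (hT x).mp hx
      rcases hU x ht with hc | hpv
      · rw [hcf] at hc; cases hc
      · exact ⟨hcf, hpv⟩
    · rintro ⟨hcf, hpv⟩
      exact (hT x).mpr ⟨hPV_tested x hcf hpv, hcf⟩
  -- B's two comprehensions characterised by the same predicates
  set crown0 : PySem.Set String := PySem.Set.ofList
      ((d.items.filter (fun kv => match kv.2 with
          | none => true
          | some p => p == kv.1)).map (·.1)) with hcrown0_def
  set toaddB : PySem.Set String := PySem.Set.ofList
      (d.items.filterMap (fun kv => match kv.2 with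
          | none => none
          | some p => if p == kv.1 || d.contains p then none else some p)) with htoaddB_def
  have hcrown0 : ∀ x, x ∈ crown0 ↔ (d.contains x = true ∧ isTerm d x = true) := by
    intro x
    rw [hcrown0_def, PySem.Set.mem_ofList]
    constructor
    · intro hx
      obtain ⟨kv, hkv, rfl⟩ := List.mem_map.mp hx
      obtain ⟨hmi, hpred⟩ := List.mem_filter.mp hkv
      obtain ⟨c, v⟩ := kv
      have hg : d.get? c = some v := PySem.Dict.get?_of_mem_items d hmi hk
      show d.contains c = true ∧ isTerm d c = true
      refine ⟨by rw [PySem.Dict.contains_eq_isSome_get?, hg]; rfl, ?_⟩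
      cases v with
      | none => simp [isTerm, hg]
      | some p =>
        have hpred' : (p == c) = true := hpred
        simp [isTerm, hg, hpred']
    · rintro ⟨hc, hterm⟩
      have hiso := PySem.Dict.contains_eq_isSome_get? d x
      rw [hc] at hiso
      cases hg : d.get? x with
      | none => rw [hg] at hiso; cases hiso
      | some v =>
        have hmi := PySem.Dict.mem_items_of_get?_eq_some d hg
        refine List.mem_map.mpr ⟨(x, v), List.mem_filter.mpr ⟨hmi, ?_⟩, rfl⟩
        cases v with
        | none => rfl
        | some p =>
          show (p == x) = true
          simp only [isTerm, hg] at hterm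
          exact hterm
  have htoaddB : ∀ x, x ∈ toaddB ↔ toaddPred d x := by
    intro x
    rw [htoaddB_def, PySem.Set.mem_ofList, List.mem_filterMap]
    constructor
    · rintro ⟨⟨c, v⟩, hmi, hf⟩
      cases v with
      | none => exact absurd hf (by simp)
      | some p =>
        have hf : (if (p == c || d.contains p) then none else some p : Option String) = some x := hf
        by_cases hcond : (p == c || d.contains p) = true
        · rw [if_pos hcond] at hf; cases hf
        · rw [if_neg hcond] at hf
          obtain rfl : p = x := by injection hf
          have hcf : d.contains p = false := by
            cases hcp : d.contains p with
            | false => rfl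
            | true => exact absurd (by rw [hcp]; simp) hcond
          exact ⟨hcf, List.mem_filterMap.mpr ⟨(c, some p), hmi, rfl⟩⟩
    · rintro ⟨hcf, hpv⟩
      obtain ⟨⟨c, v⟩, hmi, hv⟩ := List.mem_filterMap.mp hpv
      simp only at hv; subst hv
      refine ⟨(c, some x), hmi, ?_⟩
      show (if (x == c || d.contains x) then none else some x : Option String) = some x
      have hbe : (x == c) = false := by
        cases hbe : x == c with
        | false => rfl
        | true =>
          obtain rfl : x = c := by simpa using hbe
          rw [(PySem.Dict.contains_iff_mem_keys d x).mpr
            (PySem.Dict.mem_keys_of_mem_items d hmi)] at hcf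
          cases hcf
      rw [hbe, hcf]; rfl
  set crownB := PySem.Set.union crown0 toaddB with hcrownB_def
  have hmemEq : ∀ x, x ∈ stA.1 ↔ x ∈ crownB := by
    intro x
    rw [hcrownB_def, PySem.Set.mem_union, hcrownA x, crownPred]
    exact or_congr (by rw [hcrown0 x]) (by rw [htoaddB x])
  have hcnB : crownB.Nodup := PySem.Set.nodup_union _ _ (PySem.Set.nodup_ofList _)
  have hperm : stA.1.Perm crownB := (List.perm_ext_iff_of_nodup hCn hcnB).mpr hmemEq
  have hlen : stA.1.length = crownB.length := hperm.length_eq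
  have hlenB : PySem.Set.len crownB = (crownB.length : Int) := rfl
  -- the membership universe after `for node in toadd: tree[node] = None` agrees on both sides
  have htmemEq : ∀ x, x ∈ stA.2.1 ↔ x ∈ toaddB :=
    fun x => (htoaddA x).trans (htoaddB x).symm
  have hkeysA : (stA.2.1.foldl (fun d node => d.insert node none) d).keys =
      PySem.Set.update d.keys stA.2.1 :=
    PySem.Dict.keys_foldl_insert stA.2.1 (fun _ _ => none) d
  have hkeysB : (toaddB.foldl (fun d node => d.insert node none) d).keys =
      PySem.Set.update d.keys toaddB :=
    PySem.Dict.keys_foldl_insert toaddB (fun _ _ => none) d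
  have hkmem : ∀ x, x ∈ (stA.2.1.foldl (fun d node => d.insert node none) d).keys ↔
      x ∈ (toaddB.foldl (fun d node => d.insert node none) d).keys := by
    intro x
    rw [hkeysA, hkeysB, PySem.Set.mem_update, PySem.Set.mem_update, htmemEq x]
  have hksize : (stA.2.1.foldl (fun d node => d.insert node none) d).keys.length =
      (toaddB.foldl (fun d node => d.insert node none) d).keys.length := by
    refine List.Perm.length_eq ((List.perm_ext_iff_of_nodup ?_ ?_).mpr hkmem)
    · rw [hkeysA]; exact PySem.Set.nodup_update _ _ hk
    · rw [hkeysB]; exact PySem.Set.nodup_update _ _ hk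
  have hsize : (stA.2.1.foldl (fun d node => d.insert node none) d).size =
      (toaddB.foldl (fun d node => d.insert node none) d).size := by
    have e1 : ∀ (d' : PySem.Dict String (Option String)), d'.size = d'.keys.length := by
      intro d'; simp [PySem.Dict.size, PySem.Dict.keys]
    rw [e1, e1, hksize]
  have hfree : findFree (stA.2.1.foldl (fun d node => d.insert node none) d).keys 1
      ((stA.2.1.foldl (fun d node => d.insert node none) d).size + 1) =
      findFree (toaddB.foldl (fun d node => d.insert node none) d).keys 1
      ((toaddB.foldl (fun d node => d.insert node none) d).size + 1) := by
    rw [hsize]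
    exact findFree_congr _ _ hkmem 1 _
  -- now compare the three branches
  simp only
  have hb0 : PySem.Set.len crownB = (stA.1.length : Int) := by rw [hlenB, hlen]
  by_cases h0 : stA.1.length = 0
  · have hB : PySem.Set.len crownB = 0 := by rw [hb0]; exact_mod_cast h0
    rw [if_pos h0, if_pos hB]
  · have hB : ¬ (PySem.Set.len crownB = 0) := by
      rw [hb0]; exact fun hc => h0 (by exact_mod_cast hc)
    rw [if_neg h0, if_neg hB]
    by_cases h1 : stA.1.length = 1
    · have hB1 : PySem.Set.len crownB = 1 := by rw [hb0]; exact_mod_cast h1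
      rw [if_pos h1, if_pos hB1]
      obtain ⟨a, ha⟩ := List.length_eq_one_iff.mp h1
      obtain ⟨b, hb⟩ := List.length_eq_one_iff.mp (hlen ▸ h1)
      have hab : a ∈ crownB := (hmemEq a).mp (by rw [ha]; exact List.mem_singleton_self a)
      rw [hb] at hab
      obtain rfl : a = b := List.mem_singleton.mp hab
      rw [ha, show crown0.union toaddB = [a] from hb]
    · have hB1 : ¬ (PySem.Set.len crownB = 1) := by
        rw [hb0]; exact fun hc => h1 (by exact_mod_cast hc)
      rw [if_neg h1, if_neg hB1]
      rw [hfree]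

-- ===== VERDICT (by name: the statement is the Claim_ definition above) =====
theorem fill_root_spec : Claim_equal_fill_root := by
  intro tree _
  show fill_root tree = fill_root_alt tree
  exact core_eq (PySem.Dict.ofList tree) (PySem.Dict.nodup_keys_ofList tree)
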